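-- pv_equiv track=rewrite | github.com/santuchin/tests | src/main.py | log2rem
-- ===== SOURCE A (Python) =====
-- def log2rem(number: int) -> tuple[int, int]:
--
-- 	count = 0
-- 	remainder = 0
--
-- 	while number >= base:
--
-- 		number, temp = divmod(number, base)
--
-- 		remainder += temp << count
-- 		count += 1
--
-- 	return (count, remainder)
--
-- base = 10
-- ===== SOURCE B (Python) =====
-- base = 10
--
-- def log2rem(number: int) -> tuple[int, int]:
-- 	if number < base:
-- 		return (0, 0)
-- 	q, d = divmod(number, base)
-- 	c, r = log2rem(q)
-- 	return (c + 1, d + 2 * r)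
-- ===== Notes on version B (the rewrite author's own statement) =====
-- stated objective: simpler
-- what changed: Replaces A's while loop that accumulates digit << count with a count variable by a direct recursion on the quotient by the base that combines digits Horner-style (d + 2*r), eliminating the counter-indexed shift and the mutable accumulators.
import Mathlib
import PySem

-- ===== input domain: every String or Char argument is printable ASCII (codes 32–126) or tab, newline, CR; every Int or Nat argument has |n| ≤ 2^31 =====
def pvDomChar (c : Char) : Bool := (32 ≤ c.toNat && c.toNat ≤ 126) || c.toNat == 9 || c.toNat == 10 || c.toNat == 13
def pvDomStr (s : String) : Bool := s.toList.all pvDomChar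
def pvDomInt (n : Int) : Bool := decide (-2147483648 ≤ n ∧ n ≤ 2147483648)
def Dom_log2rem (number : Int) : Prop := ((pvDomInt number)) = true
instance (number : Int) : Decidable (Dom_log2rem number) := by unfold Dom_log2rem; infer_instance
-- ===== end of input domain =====

-- B replaces A's shift-accumulating while loop (remainder += digit << count) by a direct
-- recursion on number // 10 with Horner-style doubling (d + 2*r), dropping the count-indexed
-- shift; objective: simpler.

-- ===== PORT A =====
-- A's while loop over state (number, count, remainder); base = 10 (module constant inlined).
-- 'temp << count' is temp * 2^count; count starts at 0 and only increments, so count.toNat is exact.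
def log2remLoop (number count remainder : Int) : Int × Int :=
  if h : 10 ≤ number then
    log2remLoop (PySem.Int.floordiv number 10) (count + 1)
      (remainder + PySem.Int.mod number 10 * 2 ^ count.toNat)
  else (count, remainder)
termination_by number.toNat
decreasing_by
  rw [PySem.Int.floordiv_eq_ediv_of_pos (by norm_num : (0:Int) < 10)]
  omega

def log2rem (number : Int) : Int × Int := log2remLoop number 0 0

-- ===== PORT B =====
def log2rem_alt (number : Int) : Int × Int :=
  if h : number < 10 then (0, 0)
  else
    let q := PySem.Int.floordiv number 10
    let d := PySem.Int.mod number 10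
    let p := log2rem_alt q
    (p.1 + 1, d + 2 * p.2)
termination_by number.toNat
decreasing_by
  rw [PySem.Int.floordiv_eq_ediv_of_pos (by norm_num : (0:Int) < 10)]
  omega

-- ===== PRECONDITION & SPEC =====
def Spec_log2rem (number : Int) (out : Int × Int) : Prop := out = log2rem_alt number
instance (number : Int) (out : Int × Int) : Decidable (Spec_log2rem number out) := by unfold Spec_log2rem; infer_instance

-- ===== CLAIM (what is proved, stated in full; the proofs are below) =====
def Claim_equal_log2rem : Prop := ∀ (number : Int), Dom_log2rem number → Spec_log2rem number (log2rem number)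

-- ===== LEMMAS AND PROOFS =====

-- A's loop from accumulator (c, r) equals B's recursion shifted by the accumulator.
theorem log2remLoop_inv (n : Int) : ∀ c r : Int, 0 ≤ c →
    log2remLoop n c r = (c + (log2rem_alt n).1, r + (log2rem_alt n).2 * 2 ^ c.toNat) := by
  induction n using log2rem_alt.induct with
  | case1 n h =>
    intro c r hc
    rw [log2remLoop, log2rem_alt]
    simp [h, not_le.mpr h]
  | case2 n h x ih =>
    intro c r hc
    rw [log2remLoop, log2rem_alt]
    have h10 : 10 ≤ n := by omega
    simp only [dif_pos h10, dif_neg h]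
    rw [ih (c + 1) _ (by omega)]
    have hx : x = PySem.Int.floordiv n 10 := rfl
    rw [hx]
    have hpow : (2:Int) ^ (c + 1).toNat = 2 * 2 ^ c.toNat := by
      rw [show (c + 1).toNat = c.toNat + 1 by omega, pow_succ]; ring
    rw [Prod.mk.injEq]
    exact ⟨by ring, by rw [hpow]; ring⟩

-- ===== VERDICT (by name: the statement is the Claim_ definition above) =====
theorem log2rem_spec : Claim_equal_log2rem := by
  intro number _
  unfold Spec_log2rem log2rem
  rw [log2remLoop_inv number 0 0 le_rfl]
  simp
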